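-- pv_equiv track=rewrite | github.com/adamprime/comiccaster | scripts/generate_tinyview_feeds_from_data.py | group_comics_by_slug
-- ===== SOURCE A (Python) =====
-- def group_comics_by_slug(comics_data):
--     """Group comics by slug."""
--     grouped = {}
--
--     for comic in comics_data:
--         slug = comic['slug']
--         if slug not in grouped:
--             grouped[slug] = []
--         grouped[slug].append(comic)
--
--     # Sort each group by date (newest first)
--     for slug in grouped:
--         grouped[slug].sort(key=lambda x: x['date'], reverse=True)
--
--     return grouped
-- ===== SOURCE B (Python) =====
-- def group_comics_by_slug(comics_data):
--     """Group comics by slug: sort once globally (stable, newest first), then fill in one pass."""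
--     grouped = {comic['slug']: [] for comic in comics_data}
--     for comic in sorted(comics_data, key=lambda x: x['date'], reverse=True):
--         grouped[comic['slug']].append(comic)
--     return grouped
-- ===== Notes on version B (the rewrite author's own statement) =====
-- stated objective: alternative
-- what changed: A groups first and then sorts each group separately; B sorts the whole list once (stable, date-descending) and then distributes it over pre-registered slug buckets in a single pass, relying on sort stability for identical per-group order.
import Mathlib
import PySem

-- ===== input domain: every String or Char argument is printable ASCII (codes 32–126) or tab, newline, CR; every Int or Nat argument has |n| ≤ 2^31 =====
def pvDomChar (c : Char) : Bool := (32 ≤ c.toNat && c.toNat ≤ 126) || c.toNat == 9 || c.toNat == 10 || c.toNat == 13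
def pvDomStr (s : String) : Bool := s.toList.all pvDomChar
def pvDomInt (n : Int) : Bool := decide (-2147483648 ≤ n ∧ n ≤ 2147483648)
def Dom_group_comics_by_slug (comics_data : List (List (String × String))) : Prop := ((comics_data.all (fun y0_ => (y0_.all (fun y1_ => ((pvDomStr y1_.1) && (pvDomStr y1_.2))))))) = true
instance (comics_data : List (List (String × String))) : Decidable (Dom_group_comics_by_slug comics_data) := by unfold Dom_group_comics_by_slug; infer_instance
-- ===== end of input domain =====

-- B sorts the whole list once (stable, date-descending) and fills pre-registered slug buckets
-- in one pass, instead of A's group-then-sort-each-group; same return value on Pre_.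

-- ===== PORT A =====
-- comic['k']: Python dict access, modeled as first-match lookup on the association list;
-- Pre_ guarantees the key is present, so the .getD "" default is never reached on admitted inputs.
def pvGetKey (c : List (String × String)) (k : String) : Option String :=
  (PySem.Dict.mk c).get? k

def pvSlug (c : List (String × String)) : String := (pvGetKey c "slug").getD ""
def pvDate (c : List (String × String)) : String := (pvGetKey c "date").getD ""

def group_comics_by_slug (comics_data : List (List (String × String))) : List (String × List (List (String × String))) :=
  -- grouped = {}; for comic: grouped.setdefault-style append (if slug not in grouped: [], then append)
  let grouped := comics_data.foldl
    (fun g comic => PySem.Dict.modify g (pvSlug comic) [] (fun t => t ++ [comic]))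
    PySem.Dict.empty
  -- for slug in grouped: grouped[slug].sort(key=lambda x: x['date'], reverse=True)
  (grouped.items.map (fun p => (p.1, PySem.List.sorted p.2 pvDate true)))

-- ===== PORT B =====
def group_comics_by_slug_alt (comics_data : List (List (String × String))) : List (String × List (List (String × String))) :=
  -- grouped = {comic['slug']: [] for comic in comics_data}
  let grouped := comics_data.foldl
    (fun g comic => PySem.Dict.insert g (pvSlug comic) ([] : List (List (String × String))))
    PySem.Dict.empty
  -- for comic in sorted(comics_data, key=lambda x: x['date'], reverse=True): grouped[comic['slug']].append(comic)
  let filled := (PySem.List.sorted comics_data pvDate true).foldl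
    (fun g comic => PySem.Dict.modify g (pvSlug comic) [] (fun t => t ++ [comic]))
    grouped
  filled.items

-- ===== PRECONDITION & SPEC =====
-- Pre_ excludes exactly the inputs on which Python A raises KeyError: a comic without a
-- 'slug' key (grouping loop) or without a 'date' key (the sort key lambda).
def Pre_group_comics_by_slug (comics_data : List (List (String × String))) : Prop :=
  ∀ c ∈ comics_data, (pvGetKey c "slug").isSome = true ∧ (pvGetKey c "date").isSome = true
instance (comics_data : List (List (String × String))) : Decidable (Pre_group_comics_by_slug comics_data) := by unfold Pre_group_comics_by_slug; infer_instance
def pvWitness_group_comics_by_slug : (List (List (String × String))) :=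
  [[("slug", "adam"), ("date", "2024-01-02")], [("slug", "adam"), ("date", "2024-01-05")]]

def Spec_group_comics_by_slug (comics_data : List (List (String × String))) (out : List (String × List (List (String × String)))) : Prop := out = group_comics_by_slug_alt comics_data
instance (comics_data : List (List (String × String))) (out : List (String × List (List (String × String)))) : Decidable (Spec_group_comics_by_slug comics_data out) := by unfold Spec_group_comics_by_slug; infer_instance

-- ===== CLAIM (what is proved, stated in full; the proofs are below) =====
def Claim_equal_group_comics_by_slug : Prop := ∀ (comics_data : List (List (String × String))), Dom_group_comics_by_slug comics_data → Pre_group_comics_by_slug comics_data → Spec_group_comics_by_slug comics_data (group_comics_by_slug comics_data)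

-- ===== LEMMAS AND PROOFS =====

-- first match in a key-nodup association list is the pair itself
theorem pv_find?_eq_of_mem_of_nodup {κ ν : Type} [BEq κ] [LawfulBEq κ]
    (I : List (κ × ν)) (hnd : (I.map Prod.fst).Nodup) (p : κ × ν) (hp : p ∈ I) :
    I.find? (fun q => q.1 == p.1) = some p := by
  induction I with
  | nil => cases hp
  | cons q rest ih =>
    simp only [List.map_cons, List.nodup_cons] at hnd
    rcases List.mem_cons.mp hp with h | h
    · subst h; simp
    · have hne : (q.1 == p.1) = false := by
        rw [beq_eq_false_iff_ne]
        intro he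
        exact hnd.1 (he ▸ (List.mem_map.mpr ⟨p, h, rfl⟩))
      simp [hne, ih hnd.2 h]

-- Dict.modify on a present key rewrites exactly that entry, in place
theorem pv_modify_items_of_mem {κ ν : Type} [BEq κ] [LawfulBEq κ]
    (I : List (κ × ν)) (hnd : (I.map Prod.fst).Nodup) (k : κ) (hk : k ∈ I.map Prod.fst)
    (dflt : ν) (f : ν → ν) :
    (PySem.Dict.modify (PySem.Dict.mk I) k dflt f).items
      = I.map (fun p => if p.1 == k then (p.1, f p.2) else p) := by
  obtain ⟨p, hpI, hpk⟩ := List.mem_map.mp hk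
  have hfind : I.find? (fun q => q.1 == k) = some p := by
    simpa [hpk] using pv_find?_eq_of_mem_of_nodup I hnd p hpI
  have hc : (PySem.Dict.mk I).contains k = true := by
    simp only [PySem.Dict.contains, List.any_eq_true]
    exact ⟨p, hpI, by simp [hpk]⟩
  simp only [PySem.Dict.modify, PySem.Dict.insert, PySem.Dict.getD, PySem.Dict.get?, hc,
    if_pos, PySem.Dict.items, hfind, Option.map_some, Option.getD_some]
  refine List.map_congr_left (fun q hq => ?_)
  by_cases h : q.1 = k
  · have hq2 : q = p := by
      have h1 := pv_find?_eq_of_mem_of_nodup I hnd q hq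
      rw [show q.1 = p.1 from h.trans hpk.symm, hpk] at h1
      have h2 : some q = some p := h1.symm.trans hfind
      injection h2
    subst hq2
    simp [h]
  · simp [beq_eq_false_iff_ne.mpr h]

-- A's grouping loop: keys are the slugs in first-occurrence order, values the equal-slug subsequences
theorem pv_groupFold_items (l : List (List (String × String))) :
    (l.foldl (fun g c => PySem.Dict.modify g (pvSlug c) [] (fun t => t ++ [c])) PySem.Dict.empty).items
      = (PySem.Set.ofList (l.map pvSlug)).map
          (fun k => (k, l.filter (fun c => pvSlug c == k))) := by
  induction l using List.reverseRecOn with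
  | nil => rfl
  | append_singleton l c ih =>
    rw [List.foldl_append]
    have hG : (l.foldl (fun g c => PySem.Dict.modify g (pvSlug c) [] (fun t => t ++ [c])) PySem.Dict.empty)
        = PySem.Dict.mk ((PySem.Set.ofList (l.map pvSlug)).map
            (fun k => (k, l.filter (fun c => pvSlug c == k)))) := by
      apply PySem.Dict.ext; exact ih
    rw [hG]
    simp only [List.map_append, List.map_cons, List.map_nil]
    have hofl : PySem.Set.ofList (l.map pvSlug ++ [pvSlug c])
        = PySem.Set.add (PySem.Set.ofList (l.map pvSlug)) (pvSlug c) := by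
      simp [PySem.Set.ofList, List.foldl_append]
    rw [hofl]
    have map_fst : ((PySem.Set.ofList (l.map pvSlug)).map
        (fun k => (k, l.filter (fun c => pvSlug c == k)))).map Prod.fst
        = PySem.Set.ofList (l.map pvSlug) := by
      simp [List.map_map, Function.comp_def]
    by_cases hc : pvSlug c ∈ l.map pvSlug
    · have hK : pvSlug c ∈ PySem.Set.ofList (l.map pvSlug) := (PySem.Set.mem_ofList _ _).mpr hc
      have hadd : PySem.Set.add (PySem.Set.ofList (l.map pvSlug)) (pvSlug c)
          = PySem.Set.ofList (l.map pvSlug) := by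
        simp [PySem.Set.add, PySem.Set.contains, hK]
      rw [hadd]
      simp only [List.foldl_cons, List.foldl_nil]
      rw [pv_modify_items_of_mem _ (by rw [map_fst]; exact PySem.Set.nodup_ofList _)
        _ (by rw [map_fst]; exact hK)]
      rw [List.map_map]
      refine List.map_congr_left fun k hkK => ?_
      by_cases hk : k = pvSlug c
      · subst hk
        simp [List.filter_append]
      · simp [List.filter_append, Function.comp, beq_eq_false_iff_ne.mpr hk,
          beq_eq_false_iff_ne.mpr (Ne.symm hk)]
    · have hK : pvSlug c ∉ PySem.Set.ofList (l.map pvSlug) := fun h => hc ((PySem.Set.mem_ofList _ _).mp h)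
      have hadd : PySem.Set.add (PySem.Set.ofList (l.map pvSlug)) (pvSlug c)
          = PySem.Set.ofList (l.map pvSlug) ++ [pvSlug c] := by
        simp [PySem.Set.add, PySem.Set.contains, hK]
      rw [hadd]
      have hnc : (PySem.Dict.mk ((PySem.Set.ofList (l.map pvSlug)).map
          (fun k => (k, l.filter (fun c => pvSlug c == k))))).contains (pvSlug c) = false := by
        simp only [PySem.Dict.contains]
        rw [List.any_eq_false]
        intro p hp
        simp only [beq_iff_eq]
        intro he
        exact hK (he ▸ (map_fst ▸ List.mem_map.mpr ⟨p, hp, rfl⟩))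
      simp only [List.foldl_cons, List.foldl_nil]
      simp only [PySem.Dict.modify, PySem.Dict.insert, hnc, Bool.false_eq_true, if_false]
      simp only [PySem.Dict.getD, PySem.Dict.get?]
      have hfind : ((PySem.Set.ofList (l.map pvSlug)).map
          (fun k => (k, l.filter (fun c => pvSlug c == k)))).find? (fun p => p.1 == pvSlug c) = none := by
        rw [List.find?_eq_none]
        intro p hp
        simp only [beq_iff_eq]
        intro he
        exact hK (he ▸ (map_fst ▸ List.mem_map.mpr ⟨p, hp, rfl⟩))
      rw [List.map_append]
      simp only [PySem.Dict.items, hfind, Option.map_none, Option.getD_none, List.nil_append]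
      congr 1
      · refine List.map_congr_left fun k hkK => ?_
        have hk : pvSlug c ≠ k := fun he => hK (he ▸ hkK)
        simp [List.filter_append, beq_eq_false_iff_ne.mpr hk]
      · simp only [List.map_cons, List.map_nil, List.filter_append]
        have : l.filter (fun x => pvSlug x == pvSlug c) = [] := by
          rw [List.filter_eq_nil_iff]
          intro x hx
          simp only [beq_iff_eq]
          exact fun he => hc (List.mem_map.mpr ⟨x, hx, he⟩)
        simp [this]

-- B's dict comprehension: same keys in the same order, empty buckets
theorem pv_keyFold_items (l : List (List (String × String))) :
    (l.foldl (fun g c => PySem.Dict.insert g (pvSlug c) ([] : List (List (String × String)))) PySem.Dict.empty).items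
      = (PySem.Set.ofList (l.map pvSlug)).map
          (fun k => (k, ([] : List (List (String × String))))) := by
  induction l using List.reverseRecOn with
  | nil => rfl
  | append_singleton l c ih =>
    rw [List.foldl_append]
    have hG : (l.foldl (fun g c => PySem.Dict.insert g (pvSlug c) ([] : List (List (String × String)))) PySem.Dict.empty)
        = PySem.Dict.mk ((PySem.Set.ofList (l.map pvSlug)).map
            (fun k => (k, ([] : List (List (String × String)))))) := by
      apply PySem.Dict.ext; exact ih
    rw [hG]
    simp only [List.map_append, List.map_cons, List.map_nil, List.foldl_cons, List.foldl_nil]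
    have hofl : PySem.Set.ofList (l.map pvSlug ++ [pvSlug c])
        = PySem.Set.add (PySem.Set.ofList (l.map pvSlug)) (pvSlug c) := by
      simp [PySem.Set.ofList, List.foldl_append]
    rw [hofl]
    have map_fst : ((PySem.Set.ofList (l.map pvSlug)).map
        (fun k => (k, ([] : List (List (String × String)))))).map Prod.fst
        = PySem.Set.ofList (l.map pvSlug) := by
      simp [List.map_map, Function.comp_def]
    by_cases hc : pvSlug c ∈ l.map pvSlug
    · have hK : pvSlug c ∈ PySem.Set.ofList (l.map pvSlug) := (PySem.Set.mem_ofList _ _).mpr hc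
      have hadd : PySem.Set.add (PySem.Set.ofList (l.map pvSlug)) (pvSlug c)
          = PySem.Set.ofList (l.map pvSlug) := by
        simp [PySem.Set.add, PySem.Set.contains, hK]
      rw [hadd]
      have hcon : (PySem.Dict.mk ((PySem.Set.ofList (l.map pvSlug)).map
          (fun k => (k, ([] : List (List (String × String))))))).contains (pvSlug c) = true := by
        simp only [PySem.Dict.contains, List.any_eq_true]
        exact ⟨(pvSlug c, []), List.mem_map.mpr ⟨pvSlug c, hK, rfl⟩, by simp⟩
      simp only [PySem.Dict.insert, hcon, if_pos, PySem.Dict.items]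
      rw [List.map_map]
      refine List.map_congr_left fun k hkK => ?_
      by_cases hk : k = pvSlug c
      · subst hk; simp
      · simp [Function.comp, beq_eq_false_iff_ne.mpr hk]
    · have hK : pvSlug c ∉ PySem.Set.ofList (l.map pvSlug) := fun h => hc ((PySem.Set.mem_ofList _ _).mp h)
      have hadd : PySem.Set.add (PySem.Set.ofList (l.map pvSlug)) (pvSlug c)
          = PySem.Set.ofList (l.map pvSlug) ++ [pvSlug c] := by
        simp [PySem.Set.add, PySem.Set.contains, hK]
      rw [hadd]
      have hnc : (PySem.Dict.mk ((PySem.Set.ofList (l.map pvSlug)).map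
          (fun k => (k, ([] : List (List (String × String))))))).contains (pvSlug c) = false := by
        simp only [PySem.Dict.contains]
        rw [List.any_eq_false]
        intro p hp
        simp only [beq_iff_eq]
        intro he
        exact hK (he ▸ (map_fst ▸ List.mem_map.mpr ⟨p, hp, rfl⟩))
      simp only [PySem.Dict.insert, hnc, Bool.false_eq_true, if_false, PySem.Dict.items]
      simp [List.map_append]

-- B's filling loop over an all-keys-present dict appends each bucket's filter of m
theorem pv_fillFold_items (m : List (List (String × String))) :
    ∀ (I : List (String × List (List (String × String)))),
    (I.map Prod.fst).Nodup → (∀ c ∈ m, pvSlug c ∈ I.map Prod.fst) →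
    (m.foldl (fun g c => PySem.Dict.modify g (pvSlug c) [] (fun t => t ++ [c])) (PySem.Dict.mk I)).items
      = I.map (fun p => (p.1, p.2 ++ m.filter (fun c => pvSlug c == p.1))) := by
  induction m with
  | nil => intro I _ _; simp
  | cons c m ih =>
    intro I hnd hmem
    simp only [List.foldl_cons]
    have hstep : PySem.Dict.modify (PySem.Dict.mk I) (pvSlug c) [] (fun t => t ++ [c])
        = PySem.Dict.mk (I.map (fun p => if p.1 == pvSlug c then (p.1, p.2 ++ [c]) else p)) := by
      apply PySem.Dict.ext
      exact pv_modify_items_of_mem I hnd _ (hmem c (List.mem_cons_self)) [] _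
    rw [hstep]
    have hfst : ((I.map (fun p => if p.1 == pvSlug c then (p.1, p.2 ++ [c]) else p)).map Prod.fst)
        = I.map Prod.fst := by
      rw [List.map_map]
      refine List.map_congr_left fun p _ => ?_
      by_cases h : p.1 = pvSlug c <;> simp [Function.comp, h]
    rw [ih _ (hfst ▸ hnd) (fun d hd => hfst ▸ hmem d (List.mem_cons_of_mem _ hd))]
    rw [List.map_map]
    refine List.map_congr_left fun p _ => ?_
    by_cases h : p.1 = pvSlug c
    · simp [Function.comp, h, List.filter_cons, beq_iff_eq, List.append_assoc]
    · simp [Function.comp, h, List.filter_cons, beq_eq_false_iff_ne.mpr (Ne.symm h),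
        beq_eq_false_iff_ne.mpr h]

-- one unfolding step of PySem's insertion
theorem pv_insertBy_cons_eq {α : Type} (before : α → α → Bool) (x y : α) (t : List α) :
    PySem.List.insertBy before x (y :: t)
      = if before x y then x :: y :: t else y :: PySem.List.insertBy before x t := rfl

-- inserting a strictly later date goes to the front
theorem pv_insertBy_cons (x : List (String × String)) (zs : List (List (String × String)))
    (h : ∀ z ∈ zs, decide (pvDate z < pvDate x) = true) :
    PySem.List.insertBy (fun a b => decide (pvDate b < pvDate a)) x zs = x :: zs := by
  cases zs with
  | nil => rfl
  | cons z t => rw [pv_insertBy_cons_eq, if_pos (h z List.mem_cons_self)]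

-- filter commutes with stable insertion into a date-descending list
theorem pv_filter_insertBy (q : List (String × String) → Bool) (x : List (String × String))
    (ys : List (List (String × String))) (h : ys.Pairwise (fun a b => pvDate b ≤ pvDate a)) :
    (PySem.List.insertBy (fun a b => decide (pvDate b < pvDate a)) x ys).filter q
      = if q x then PySem.List.insertBy (fun a b => decide (pvDate b < pvDate a)) x (ys.filter q)
        else ys.filter q := by
  induction ys with
  | nil => by_cases hq : q x <;> simp [PySem.List.insertBy, hq]
  | cons y t ih =>
    rw [List.pairwise_cons] at h
    by_cases hb : pvDate y < pvDate x
    · rw [pv_insertBy_cons_eq, if_pos (decide_eq_true hb)]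
      by_cases hq : q x
      · rw [if_pos hq, List.filter_cons_of_pos hq]
        by_cases hqy : q y
        · rw [List.filter_cons_of_pos hqy, pv_insertBy_cons_eq, if_pos (decide_eq_true hb)]
        · rw [List.filter_cons_of_neg (by simp [hqy])]
          rw [pv_insertBy_cons x (t.filter q)
            (fun z hz => decide_eq_true (lt_of_le_of_lt (h.1 z (List.mem_of_mem_filter hz)) hb))]
      · rw [if_neg hq, List.filter_cons_of_neg (by simp [hq])]
    · have hb' : (decide (pvDate y < pvDate x)) = false := decide_eq_false hb
      rw [pv_insertBy_cons_eq, if_neg (by rw [hb']; simp)]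
      by_cases hqy : q y
      · rw [List.filter_cons_of_pos hqy, List.filter_cons_of_pos hqy, ih h.2]
        by_cases hq : q x
        · rw [if_pos hq, if_pos hq, pv_insertBy_cons_eq, if_neg (by rw [hb']; simp)]
        · rw [if_neg hq, if_neg hq]
      · rw [List.filter_cons_of_neg (by simp [hqy]), List.filter_cons_of_neg (by simp [hqy]),
          ih h.2]

-- filter commutes with the stable reverse sort (stability: ties keep original order)
theorem pv_filter_sorted (q : List (String × String) → Bool) (l : List (List (String × String))) :
    (PySem.List.sorted l pvDate true).filter q = PySem.List.sorted (l.filter q) pvDate true := by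
  induction l using List.reverseRecOn with
  | nil => rfl
  | append_singleton l c ih =>
    rw [PySem.List.sorted_rev_eq_foldl_insertBy, List.foldl_append, List.foldl_cons, List.foldl_nil,
      ← PySem.List.sorted_rev_eq_foldl_insertBy]
    rw [pv_filter_insertBy q c _ (PySem.List.sorted_pairwise_rev l pvDate)]
    rw [List.filter_append]
    by_cases hq : q c
    · have hfc : List.filter q [c] = [c] := by simp [hq]
      rw [hfc, if_pos hq, ih,
        PySem.List.sorted_rev_eq_foldl_insertBy (l.filter q ++ [c]), List.foldl_append,
        List.foldl_cons, List.foldl_nil, ← PySem.List.sorted_rev_eq_foldl_insertBy]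
    · have hfc : List.filter q [c] = [] := by simp [hq]
      rw [hfc, if_neg (by simp [hq]), List.append_nil, ih]

-- ===== VERDICT (by name: the statement is the Claim_ definition above) =====
theorem group_comics_by_slug_spec : Claim_equal_group_comics_by_slug := by
  intro l _ _
  unfold Spec_group_comics_by_slug
  simp only [group_comics_by_slug, group_comics_by_slug_alt]
  rw [pv_groupFold_items, List.map_map]
  have hgd : (l.foldl (fun g c => PySem.Dict.insert g (pvSlug c) ([] : List (List (String × String)))) PySem.Dict.empty)
      = PySem.Dict.mk ((PySem.Set.ofList (l.map pvSlug)).map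
          (fun k => (k, ([] : List (List (String × String)))))) := by
    apply PySem.Dict.ext; exact pv_keyFold_items l
  rw [hgd]
  have map_fst : (((PySem.Set.ofList (l.map pvSlug)).map
      (fun k => (k, ([] : List (List (String × String)))))).map Prod.fst)
      = PySem.Set.ofList (l.map pvSlug) := by
    simp [List.map_map, Function.comp_def]
  rw [pv_fillFold_items _ _ (by rw [map_fst]; exact PySem.Set.nodup_ofList _)
    (by
      rw [map_fst]
      intro c hc
      exact (PySem.Set.mem_ofList _ _).mpr
        (List.mem_map.mpr ⟨c, (PySem.List.mem_sorted l pvDate true c).mp hc, rfl⟩))]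
  rw [List.map_map]
  refine List.map_congr_left fun k _ => ?_
  simp only [Function.comp_def, List.nil_append]
  rw [pv_filter_sorted]
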